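-- pv_equiv track=rewrite | github.com/prisik-45/Proposal-Agent | backend/src/graph.py | _technology_rows_from_override
-- ===== SOURCE A (Python) =====
-- def _technology_rows_from_override(technology_text: str) -> list[tuple[str, str]]:
--     text = technology_text.strip()
--     lower = text.lower()
--     rows: list[tuple[str, str]] = []
--
--     layer_keywords = [
--         ("Frontend", ["next", "react", "vue", "angular", "frontend"]),
--         ("Styling", ["tailwind", "css", "bootstrap", "styled"]),
--         ("Backend", ["node", "express", "fastapi", "django", "flask", "backend"]),
--         ("Database", ["postgres", "mysql", "mongodb", "mongo", "supabase", "database", "db"]),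
--         ("AI / LLM", ["openai", "groq", "langchain", "langgraph", "llm", "ai"]),
--         ("Automation", ["zapier", "make", "n8n", "webhook", "automation"]),
--         ("Hosting", ["vercel", "aws", "azure", "gcp", "vps", "hosting", "cloud"]),
--     ]
--
--     parts = [part.strip(" .") for part in text.replace(" and ", ", ").split(",") if part.strip(" .")]
--     used_parts: set[str] = set()
--     for layer, keywords in layer_keywords:
--         matches = [part for part in parts if any(keyword in part.lower() for keyword in keywords)]
--         if matches:
--             rows.append((layer, " / ".join(matches)))
--             used_parts.update(matches)
--
--     remaining = [part for part in parts if part not in used_parts]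
--     if remaining:
--         rows.append(("Additional Tools", " / ".join(remaining)))
--
--     return rows or [("Requested Stack", text)]
-- ===== SOURCE B (Python) =====
-- def _technology_rows_from_override(technology_text: str) -> list[tuple[str, str]]:
--     text = technology_text.strip()
--
--     layer_keywords = [
--         ("Frontend", ["next", "react", "vue", "angular", "frontend"]),
--         ("Styling", ["tailwind", "css", "bootstrap", "styled"]),
--         ("Backend", ["node", "express", "fastapi", "django", "flask", "backend"]),
--         ("Database", ["postgres", "mysql", "mongodb", "mongo", "supabase", "database", "db"]),
--         ("AI / LLM", ["openai", "groq", "langchain", "langgraph", "llm", "ai"]),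
--         ("Automation", ["zapier", "make", "n8n", "webhook", "automation"]),
--         ("Hosting", ["vercel", "aws", "azure", "gcp", "vps", "hosting", "cloud"]),
--     ]
--
--     parts = [part.strip(" .") for part in text.replace(" and ", ", ").split(",") if part.strip(" .")]
--
--     # one pass over parts: drop each part into every layer bucket it matches
--     buckets = [(layer, keywords, []) for layer, keywords in layer_keywords]
--     extras: list[str] = []
--     for part in parts:
--         pl = part.lower()
--         hit = False
--         for _layer, keywords, bucket in buckets:
--             if any(keyword in pl for keyword in keywords):
--                 bucket.append(part)
--                 hit = True
--         if not hit:
--             extras.append(part)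
--
--     rows = [(layer, " / ".join(bucket)) for layer, _keywords, bucket in buckets if bucket]
--     if extras:
--         rows.append(("Additional Tools", " / ".join(extras)))
--     return rows or [("Requested Stack", text)]
-- ===== Notes on version B (the rewrite author's own statement) =====
-- stated objective: alternative
-- what changed: A scans the parts list once per layer (7 filter passes) and keeps a used-parts set to compute leftovers; B makes a single pass over parts, appending each part to every matching layer bucket (or to an extras list when no layer matches), then emits rows from the buckets in layer order.
import Mathlib
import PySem

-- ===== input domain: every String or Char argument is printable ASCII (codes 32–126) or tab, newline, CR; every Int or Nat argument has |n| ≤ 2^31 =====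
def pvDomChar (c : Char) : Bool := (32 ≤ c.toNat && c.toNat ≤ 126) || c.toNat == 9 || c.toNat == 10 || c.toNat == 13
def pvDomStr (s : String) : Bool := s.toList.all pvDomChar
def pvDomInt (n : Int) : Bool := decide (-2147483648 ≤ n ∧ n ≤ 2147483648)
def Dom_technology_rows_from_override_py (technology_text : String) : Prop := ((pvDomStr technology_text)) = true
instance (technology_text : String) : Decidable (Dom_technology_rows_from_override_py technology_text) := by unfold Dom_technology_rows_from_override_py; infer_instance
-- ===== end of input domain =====

-- B replaces A's per-layer rescans of `parts` (plus a used-parts set for leftovers) by ONE pass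
-- over `parts` that appends each part to every matching layer bucket, collecting unmatched parts
-- as it goes; same rows, same order ("alternative" decomposition, no speed claim).

-- the fixed layer → keywords table (module data shared by both ports)
def pvLayers : List (String × List String) :=
  [("Frontend", ["next", "react", "vue", "angular", "frontend"]),
   ("Styling", ["tailwind", "css", "bootstrap", "styled"]),
   ("Backend", ["node", "express", "fastapi", "django", "flask", "backend"]),
   ("Database", ["postgres", "mysql", "mongodb", "mongo", "supabase", "database", "db"]),
   ("AI / LLM", ["openai", "groq", "langchain", "langgraph", "llm", "ai"]),
   ("Automation", ["zapier", "make", "n8n", "webhook", "automation"]),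
   ("Hosting", ["vercel", "aws", "azure", "gcp", "vps", "hosting", "cloud"])]

-- any(keyword in pl for keyword in keywords)
def pvMatch (keywords : List String) (pl : String) : Bool :=
  keywords.any (fun k => PySem.Str.isIn k pl)

-- [part.strip(" .") for part in text.replace(" and ", ", ").split(",") if part.strip(" .")]
def pvParts (text : String) : List String :=
  (((((PySem.Str.split? (PySem.Str.replace text " and " ", ") ",").getD [])).map
      (fun part => PySem.Str.stripChars part " .")).filter (fun part => !(part == "")))

-- ===== PORT A =====
def technology_rows_from_override_py (technology_text : String) : List (String × String) :=
  let text := PySem.Str.strip technology_text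
  let parts := pvParts text
  -- for layer, keywords in layer_keywords: ms = [...]; if ms: rows.append(...); used_parts.update(ms)
  let st := pvLayers.foldl (fun (st : List (String × String) × PySem.Set String) lk =>
      let ms := parts.filter (fun part => pvMatch lk.2 (PySem.Str.lower part))
      if ms ≠ [] then
        (st.1 ++ [(lk.1, PySem.Str.join " / " ms)], PySem.Set.update st.2 ms)
      else st) ([], PySem.Set.empty)
  let remaining := parts.filter (fun part => !(PySem.Set.contains st.2 part))
  let rows := if remaining ≠ [] then st.1 ++ [("Additional Tools", PySem.Str.join " / " remaining)] else st.1
  if rows ≠ [] then rows else [("Requested Stack", text)]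

-- ===== PORT B =====
-- state: (buckets = list of (layer, keywords, matched parts so far), extras so far)
def technology_rows_from_override_py_alt (technology_text : String) : List (String × String) :=
  let text := PySem.Str.strip technology_text
  let parts := pvParts text
  let st := parts.foldl (fun (st : List (String × List String × List String) × List String) part =>
      let pl := PySem.Str.lower part
      let hit := st.1.any (fun e => pvMatch e.2.1 pl)
      (st.1.map (fun e => if pvMatch e.2.1 pl then (e.1, e.2.1, e.2.2 ++ [part]) else e),
       if hit then st.2 else st.2 ++ [part]))
    (pvLayers.map (fun lk => (lk.1, lk.2, ([] : List String))), ([] : List String))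
  let rows := st.1.filterMap (fun e => if e.2.2 ≠ [] then some (e.1, PySem.Str.join " / " e.2.2) else none)
  let rows := if st.2 ≠ [] then rows ++ [("Additional Tools", PySem.Str.join " / " st.2)] else rows
  if rows ≠ [] then rows else [("Requested Stack", text)]

-- ===== PRECONDITION & SPEC =====
def Spec_technology_rows_from_override_py (technology_text : String) (out : List (String × String)) : Prop := out = technology_rows_from_override_py_alt technology_text
instance (technology_text : String) (out : List (String × String)) : Decidable (Spec_technology_rows_from_override_py technology_text out) := by unfold Spec_technology_rows_from_override_py; infer_instance

-- ===== CLAIM (what is proved, stated in full; the proofs are below) =====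
def Claim_equal_technology_rows_from_override_py : Prop := ∀ (technology_text : String), Dom_technology_rows_from_override_py technology_text → Spec_technology_rows_from_override_py technology_text (technology_rows_from_override_py technology_text)

-- ===== LEMMAS AND PROOFS =====

-- B's single pass: each bucket ends up holding exactly the parts its keywords match, extras the rest
theorem pv_bfold (parts : List String) (bs : List (String × List String × List String)) (ex : List String) :
    parts.foldl (fun (st : List (String × List String × List String) × List String) part =>
      let pl := PySem.Str.lower part
      let hit := st.1.any (fun e => pvMatch e.2.1 pl)
      (st.1.map (fun e => if pvMatch e.2.1 pl then (e.1, e.2.1, e.2.2 ++ [part]) else e),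
       if hit then st.2 else st.2 ++ [part])) (bs, ex)
    = (bs.map (fun e => (e.1, e.2.1, e.2.2 ++ parts.filter (fun p => pvMatch e.2.1 (PySem.Str.lower p)))),
       ex ++ parts.filter (fun p => !(bs.any (fun e => pvMatch e.2.1 (PySem.Str.lower p))))) := by
  induction parts generalizing bs ex with
  | nil => simp
  | cons p ps ih =>
    simp only [List.foldl_cons]
    rw [ih]
    have h21 : ∀ e : String × List String × List String,
        ((if pvMatch e.2.1 (PySem.Str.lower p) then (e.1, e.2.1, e.2.2 ++ [p]) else e) : String × List String × List String).2.1 = e.2.1 := by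
      intro e; by_cases h : pvMatch e.2.1 (PySem.Str.lower p) <;> simp [h]
    have hany : ∀ q : String,
        ((bs.map (fun e => if pvMatch e.2.1 (PySem.Str.lower p) then (e.1, e.2.1, e.2.2 ++ [p]) else e)).any
          (fun e => pvMatch e.2.1 (PySem.Str.lower q)))
        = bs.any (fun e => pvMatch e.2.1 (PySem.Str.lower q)) := by
      intro q
      rw [List.any_map]
      apply PySem.List.any_congr_mem
      intro e _
      simp [Function.comp, h21 e]
    simp only [Prod.mk.injEq]
    constructor
    · rw [List.map_map]
      apply List.map_congr_left
      intro e _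
      obtain ⟨l, kw, b⟩ := e
      by_cases h : pvMatch kw (PySem.Str.lower p) <;>
        simp [Function.comp, h, List.append_assoc]
    · rw [List.filter_congr (fun q _ => by rw [hany q])]
      by_cases hhit : bs.any (fun e => pvMatch e.2.1 (PySem.Str.lower p)) <;>
        simp [hhit, List.append_assoc]

-- A's layer loop, rows component: one conditional row per layer with a non-empty match list
theorem pv_afold_fst (parts : List String) (L : List (String × List String))
    (r0 : List (String × String)) (u0 : PySem.Set String) :
    (L.foldl (fun (st : List (String × String) × PySem.Set String) lk =>
      let ms := parts.filter (fun part => pvMatch lk.2 (PySem.Str.lower part))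
      if ms ≠ [] then
        (st.1 ++ [(lk.1, PySem.Str.join " / " ms)], PySem.Set.update st.2 ms)
      else st) (r0, u0)).1
    = r0 ++ L.filterMap (fun lk =>
        let ms := parts.filter (fun part => pvMatch lk.2 (PySem.Str.lower part))
        if ms ≠ [] then some (lk.1, PySem.Str.join " / " ms) else none) := by
  induction L generalizing r0 u0 with
  | nil => simp
  | cons lk L ih =>
    simp only [List.foldl_cons]
    by_cases h : parts.filter (fun part => pvMatch lk.2 (PySem.Str.lower part)) = []
    · rw [if_neg (not_not_intro h), ih]
      simp only [List.filterMap_cons]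
      rw [if_neg (not_not_intro h)]
    · rw [if_pos h, ih]
      simp only [List.filterMap_cons]
      rw [if_pos h]
      simp

-- A's layer loop, used-parts component: a part is in the set iff some layer's filter caught it
theorem pv_afold_snd_mem (parts : List String) (L : List (String × List String))
    (r0 : List (String × String)) (u0 : PySem.Set String) (p : String) :
    (p ∈ (L.foldl (fun (st : List (String × String) × PySem.Set String) lk =>
      let ms := parts.filter (fun part => pvMatch lk.2 (PySem.Str.lower part))
      if ms ≠ [] then
        (st.1 ++ [(lk.1, PySem.Str.join " / " ms)], PySem.Set.update st.2 ms)
      else st) (r0, u0)).2)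
    ↔ (p ∈ u0 ∨ ∃ lk ∈ L, p ∈ parts.filter (fun part => pvMatch lk.2 (PySem.Str.lower part))) := by
  induction L generalizing r0 u0 with
  | nil => simp
  | cons lk L ih =>
    simp only [List.foldl_cons]
    by_cases h : parts.filter (fun part => pvMatch lk.2 (PySem.Str.lower part)) = []
    · rw [if_neg (not_not_intro h), ih]
      have hx : ¬(p ∈ parts ∧ pvMatch lk.2 (PySem.Str.lower p) = true) := fun hc => by
        have hin : p ∈ List.filter (fun part => pvMatch lk.2 (PySem.Str.lower part)) parts :=
          List.mem_filter.mpr ⟨hc.1, hc.2⟩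
        rw [h] at hin
        exact absurd hin (List.not_mem_nil)
      simp only [List.mem_filter, List.exists_mem_cons_iff]
      tauto
    · rw [if_pos h, ih]
      simp [PySem.Set.mem_update, or_assoc]

-- A's remaining list is exactly B's extras predicate over parts
theorem pv_remaining (parts : List String) :
    parts.filter (fun part => !(PySem.Set.contains (pvLayers.foldl (fun (st : List (String × String) × PySem.Set String) lk =>
      let ms := parts.filter (fun part => pvMatch lk.2 (PySem.Str.lower part))
      if ms ≠ [] then
        (st.1 ++ [(lk.1, PySem.Str.join " / " ms)], PySem.Set.update st.2 ms)
      else st) ([], PySem.Set.empty)).2 part))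
    = parts.filter (fun p => !(pvLayers.any (fun lk => pvMatch lk.2 (PySem.Str.lower p)))) := by
  apply List.filter_congr
  intro p hp
  have hmem := pv_afold_snd_mem parts pvLayers [] PySem.Set.empty p
  have h2 : (PySem.Set.contains (pvLayers.foldl (fun (st : List (String × String) × PySem.Set String) lk =>
      let ms := parts.filter (fun part => pvMatch lk.2 (PySem.Str.lower part))
      if ms ≠ [] then
        (st.1 ++ [(lk.1, PySem.Str.join " / " ms)], PySem.Set.update st.2 ms)
      else st) ([], PySem.Set.empty)).2 p)
      = pvLayers.any (fun lk => pvMatch lk.2 (PySem.Str.lower p)) := by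
    rw [Bool.eq_iff_iff, PySem.Set.contains_iff, hmem]
    simp [PySem.Set.empty, List.any_eq_true, List.mem_filter, hp]
  rw [h2]

-- the two bodies agree for an arbitrary parts list (parts kept abstract so terms stay small)
theorem pv_core (text : String) (parts : List String) :
    (let st := pvLayers.foldl (fun (st : List (String × String) × PySem.Set String) lk =>
        let ms := parts.filter (fun part => pvMatch lk.2 (PySem.Str.lower part))
        if ms ≠ [] then
          (st.1 ++ [(lk.1, PySem.Str.join " / " ms)], PySem.Set.update st.2 ms)
        else st) ([], PySem.Set.empty)
     let remaining := parts.filter (fun part => !(PySem.Set.contains st.2 part))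
     let rows := if remaining ≠ [] then st.1 ++ [("Additional Tools", PySem.Str.join " / " remaining)] else st.1
     if rows ≠ [] then rows else [("Requested Stack", text)])
    = (let st := parts.foldl (fun (st : List (String × List String × List String) × List String) part =>
        let pl := PySem.Str.lower part
        let hit := st.1.any (fun e => pvMatch e.2.1 pl)
        (st.1.map (fun e => if pvMatch e.2.1 pl then (e.1, e.2.1, e.2.2 ++ [part]) else e),
         if hit then st.2 else st.2 ++ [part]))
        (pvLayers.map (fun lk => (lk.1, lk.2, ([] : List String))), ([] : List String))
       let rows := st.1.filterMap (fun e => if e.2.2 ≠ [] then some (e.1, PySem.Str.join " / " e.2.2) else none)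
       let rows := if st.2 ≠ [] then rows ++ [("Additional Tools", PySem.Str.join " / " st.2)] else rows
       if rows ≠ [] then rows else [("Requested Stack", text)]) := by
  rw [pv_bfold]
  dsimp only
  rw [pv_afold_fst, pv_remaining]
  simp only [List.map_map, List.filterMap_map, List.any_map, Function.comp_def, List.nil_append]

-- ===== VERDICT (by name: the statement is the Claim_ definition above) =====
set_option maxHeartbeats 1000000 in
theorem technology_rows_from_override_py_spec : Claim_equal_technology_rows_from_override_py := by
  intro t _
  unfold Spec_technology_rows_from_override_py
  exact pv_core (PySem.Str.strip t) (pvParts (PySem.Str.strip t))
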